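-- pv_equiv track=rewrite | github.com/juyashuiasd/Bridge-en-red | Cliente.py | valorMejorado
-- ===== SOURCE A (Python) =====
-- def valorMejorado(lista):
--
--     def condicion(a,b):
--         return a[0] + 1 == b[0] and a[1] == b[1]
--
--     def transforma(lista):
--         valor = lista[-1][0]
--         return [(valor,b[1]) for b in lista]
--
--     aux = []
--     listaR = []
--     for i in range(len(lista)):
--         if i == len(lista) - 1 or not condicion(lista[i],lista[i+1]):
--             aux.append(lista[i])
--             aux = transforma(aux)
--             listaR += aux
--             aux = []
--             if i == len(lista) - 1:
--                 listaR = [x for x in listaR if x[0] > 0]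
--                 return listaR
--         else:
--             aux.append(lista[i])
-- ===== SOURCE B (Python) =====
-- def valorMejorado(lista):
--     if not lista:
--         return None
--     n = len(lista)
--     res = [None] * n
--     target = None
--     for i in range(n - 1, -1, -1):
--         if i == n - 1 or not (lista[i][0] + 1 == lista[i + 1][0] and lista[i][1] == lista[i + 1][1]):
--             target = lista[i][0]
--         res[i] = (target, lista[i][1])
--     return [x for x in res if x[0] > 0]
-- ===== Notes on version B (the rewrite author's own statement) =====
-- stated objective: alternative
-- what changed: Replaces A's forward pass that buffers each ascending run in an aux list and then rewrites and splices it via transforma with a single right-to-left pass carrying the run's target value, filling the result per index and filtering once.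
-- outside the precondition, e.g. on valorMejorado([]): A returns None, B returns None
import Mathlib
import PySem

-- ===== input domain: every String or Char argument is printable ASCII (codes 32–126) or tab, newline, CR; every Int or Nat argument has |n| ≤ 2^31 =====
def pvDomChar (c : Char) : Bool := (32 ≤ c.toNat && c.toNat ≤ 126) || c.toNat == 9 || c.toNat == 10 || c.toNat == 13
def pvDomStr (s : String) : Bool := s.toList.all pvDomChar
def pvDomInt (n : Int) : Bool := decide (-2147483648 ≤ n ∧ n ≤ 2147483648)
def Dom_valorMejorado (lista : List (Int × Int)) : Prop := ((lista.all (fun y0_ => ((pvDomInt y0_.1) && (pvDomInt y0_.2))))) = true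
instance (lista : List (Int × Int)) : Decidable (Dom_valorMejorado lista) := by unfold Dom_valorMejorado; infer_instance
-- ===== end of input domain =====

-- B replaces A's buffered-group rewrite (collect a run, then map it through `transforma`
-- and splice it in) by a single right-to-left pass carrying the run's target value;
-- objective: alternative decomposition, same O(n) cost.

-- ===== PORT A =====
-- condicion(a,b) = a[0]+1 == b[0] and a[1] == b[1]
def condicion (a b : Int × Int) : Bool := a.1 + 1 == b.1 && a.2 == b.2

-- transforma: valor = lista[-1][0]; [(valor, b[1]) for b in lista]
def transforma (l : List (Int × Int)) : List (Int × Int) :=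
  let valor := ((PySem.List.pyGet? l (-1)).getD (0, 0)).1
  l.map (fun b => (valor, b.2))

-- the for-loop over i with state (aux, listaR), as structural recursion on the suffix
-- lista[i:]; 'i == len-1' becomes 'the suffix is a singleton', lista[i+1] the second element.
def goA (aux listaR suffix : List (Int × Int)) : List (Int × Int) :=
  match suffix with
  | [] => []   -- loop falls off the end only for lista = [], where Python returns None (excluded by Pre_)
  | [x] =>
      let aux2 := transforma (aux ++ [x])
      let listaR2 := listaR ++ aux2
      listaR2.filter (fun p => decide (p.1 > 0))
  | x :: y :: rest =>
      if condicion x y then goA (aux ++ [x]) listaR (y :: rest)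
      else goA [] (listaR ++ transforma (aux ++ [x])) (y :: rest)

def valorMejorado (lista : List (Int × Int)) : List (Int × Int) := goA [] [] lista

-- ===== PORT B =====
-- right-to-left pass: returns (result list, current carried target); B's descending index
-- loop is this structural recursion from the right, `target` is the second component.
def backPass (l : List (Int × Int)) : List (Int × Int) × Int :=
  match l with
  | [] => ([], 0)
  | [a] => ([(a.1, a.2)], a.1)
  | a :: b :: rest =>
      let (res, tgt) := backPass (b :: rest)
      let t := if condicion a b then tgt else a.1
      ((t, a.2) :: res, t)

-- B returns None for lista = [] (outside Pre_); here backPass [] yields [] and the filter keeps [].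
def valorMejorado_alt (lista : List (Int × Int)) : List (Int × Int) :=
  ((backPass lista).1).filter (fun p => decide (p.1 > 0))

-- ===== PRECONDITION & SPEC =====
-- Pre_ excludes only the empty list, on which Python A returns None — not a value of the
-- declared list type.
def Pre_valorMejorado (lista : List (Int × Int)) : Prop := lista ≠ []
instance (lista : List (Int × Int)) : Decidable (Pre_valorMejorado lista) := by unfold Pre_valorMejorado; infer_instance
def pvWitness_valorMejorado : (List (Int × Int)) := [(1, 2), (2, 2), (5, 0)]

def Spec_valorMejorado (lista : List (Int × Int)) (out : List (Int × Int)) : Prop := out = valorMejorado_alt lista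
instance (lista : List (Int × Int)) (out : List (Int × Int)) : Decidable (Spec_valorMejorado lista out) := by unfold Spec_valorMejorado; infer_instance

-- ===== CLAIM (what is proved, stated in full; the proofs are below) =====
def Claim_equal_valorMejorado : Prop := ∀ (lista : List (Int × Int)), Dom_valorMejorado lista → Pre_valorMejorado lista → Spec_valorMejorado lista (valorMejorado lista)

-- ===== LEMMAS AND PROOFS =====

-- "aux chains into x": every element of aux satisfies condicion with its successor,
-- the successor of the last element being x.
def runInto : List (Int × Int) → (Int × Int) → Bool
  | [], _ => true
  | a :: rest, x => condicion a (rest.headD x) && runInto rest x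

theorem runInto_snoc (aux : List (Int × Int)) (x y : Int × Int)
    (h : runInto aux x = true) (hc : condicion x y = true) :
    runInto (aux ++ [x]) y = true := by
  induction aux with
  | nil => simp [runInto, hc]
  | cons a aux ih =>
    simp only [runInto, Bool.and_eq_true] at h
    have hh : (aux ++ [x]).headD y = aux.headD x := by cases aux <;> simp [List.headD]
    simp only [List.cons_append, runInto, hh, Bool.and_eq_true]
    exact ⟨h.1, ih h.2⟩

theorem transforma_snoc (z : List (Int × Int)) (x : Int × Int) :
    transforma (z ++ [x]) = (z ++ [x]).map (fun b => (x.1, b.2)) := by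
  simp [transforma, PySem.List.pyGet?_neg_one_append_singleton]

-- backPass on a run `z ++ [x]` followed by a suffix it does not chain into splits:
-- the run gets target x.1 everywhere and the suffix is processed independently.
theorem backPass_split (z : List (Int × Int)) (x : Int × Int) (s : List (Int × Int))
    (hz : runInto z x = true)
    (hs : ∀ y ∈ s.head?, condicion x y = false) :
    backPass (z ++ x :: s) = ((z ++ [x]).map (fun b => (x.1, b.2)) ++ (backPass s).1, x.1) := by
  induction z with
  | nil =>
    cases s with
    | nil => simp [backPass]
    | cons y rest =>
      have hxy : condicion x y = false := hs y rfl
      simp [backPass, hxy]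
  | cons a z' ih =>
    have h' : runInto z' x = true := by
      simp only [runInto, Bool.and_eq_true] at hz; exact hz.2
    have hrec := ih h'
    have hab : condicion a ((z').headD x) = true := by
      simp only [runInto, Bool.and_eq_true] at hz; exact hz.1
    cases z' with
    | nil =>
      simp only [List.nil_append] at hrec
      have hab' : condicion a x = true := by simpa [List.headD] using hab
      rw [show backPass ([a] ++ x :: s) =
        (let (res, tgt) := backPass (x :: s);
         let t := if condicion a x then tgt else a.1; ((t, a.2) :: res, t)) from by cases s <;> rfl]
      simp [hrec, hab']
    | cons b z'' =>
      simp only [List.headD] at hab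
      simp only [List.cons_append]
      rw [show backPass (a :: (b :: (z'' ++ x :: s))) =
        (let (res, tgt) := backPass (b :: (z'' ++ x :: s));
         let t := if condicion a b then tgt else a.1; ((t, a.2) :: res, t)) from rfl]
      simp only [List.cons_append] at hrec
      simp [hrec, hab]

theorem goA_eq (s' : List (Int × Int)) :
    ∀ (x : Int × Int) (aux acc : List (Int × Int)), runInto aux x = true →
    goA aux acc (x :: s') =
      (acc ++ (backPass (aux ++ x :: s')).1).filter (fun p => decide (p.1 > 0)) := by
  induction s' with
  | nil =>
    intro x aux acc h
    have := backPass_split aux x [] h (by simp)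
    simp [goA, this, transforma_snoc, backPass]
  | cons y rest ih =>
    intro x aux acc h
    by_cases hc : condicion x y = true
    · have h2 : runInto (aux ++ [x]) y = true := runInto_snoc aux x y h hc
      have := ih y (aux ++ [x]) acc h2
      simpa [goA, hc, List.append_assoc] using this
    · have hcf : condicion x y = false := by simpa using hc
      have hsplit := backPass_split aux x (y :: rest) h (by intro z hz; simp at hz; subst hz; exact hcf)
      have hrec := ih y [] (acc ++ transforma (aux ++ [x])) (by simp [runInto])
      simp only [List.nil_append] at hrec
      rw [show goA aux acc (x :: y :: rest) =
            goA [] (acc ++ transforma (aux ++ [x])) (y :: rest) from by simp [goA, hcf]]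
      rw [hrec, hsplit, transforma_snoc]
      simp [List.filter_append, List.append_assoc]

-- ===== VERDICT (by name: the statement is the Claim_ definition above) =====
theorem valorMejorado_spec : Claim_equal_valorMejorado := by
  intro lista _ hpre
  unfold Spec_valorMejorado valorMejorado valorMejorado_alt
  cases lista with
  | nil => exact absurd rfl hpre
  | cons x s' =>
    have := goA_eq s' x [] [] (by simp [runInto])
    simpa using this
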